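-- pv_equiv track=rewrite | github.com/JuliannaMali/pp1 | 04-Subroutines/After-class/ex-44.py | f
-- ===== SOURCE A (Python) =====
-- def f(password):
--     if len(password) >= 6:
--         password = list(password)
--         list1 = []
--         for x in password:
--             y = password.count(x)
--             if y > 1:
--                 list1.append(0)
--             else:
--                 list1.append(1)
--         if 0 in list1:
--             return False
--         else:
--             return True
--     else:
--         return False
-- ===== SOURCE B (Python) =====
-- def f(password):
--     if len(password) < 6:
--         return False
--     s = sorted(password)
--     for a, b in zip(s, s[1:]):
--         if a == b:
--             return False
--     return True
-- ===== Notes on version B (the rewrite author's own statement) =====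
-- stated objective: faster
-- what changed: Replaces the per-character password.count rescan (quadratic) by a single sort followed by one adjacent-pair scan that detects any duplicate.
import Mathlib
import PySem

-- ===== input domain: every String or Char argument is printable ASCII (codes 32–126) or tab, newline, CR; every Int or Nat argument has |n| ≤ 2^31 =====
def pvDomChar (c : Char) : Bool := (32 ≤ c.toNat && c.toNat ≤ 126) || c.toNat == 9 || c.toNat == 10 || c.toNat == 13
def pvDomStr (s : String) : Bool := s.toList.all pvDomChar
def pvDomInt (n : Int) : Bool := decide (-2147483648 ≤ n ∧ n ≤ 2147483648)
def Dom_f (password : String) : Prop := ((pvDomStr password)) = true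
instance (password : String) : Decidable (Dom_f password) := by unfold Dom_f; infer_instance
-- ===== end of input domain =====

-- B sorts the password and scans adjacent pairs for a duplicate instead of A's per-character count rescan (faster: asymptotic).


-- ===== PORT A =====
-- list1 built by A's loop: for x in password: y = password.count(x); append 0 or 1
def aLoop (pw : List Char) : List Int :=
  pw.foldl (fun acc x =>
    if 1 < PySem.List.count pw x then acc ++ [(0 : Int)] else acc ++ [(1 : Int)]) []

def f (password : String) : Bool :=
  if 6 ≤ PySem.Str.len password then
    if (0 : Int) ∈ aLoop password.toList then false else true   -- if 0 in list1
  else false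

-- ===== PORT B =====
-- the 'for a, b in zip(s, s[1:])' loop of Source B
def adjLoop : List (Char × Char) → Bool
  | [] => true
  | (a, b) :: rest => if a == b then false else adjLoop rest

-- s = sorted(password); scan zip(s, s[1:])
def bScan (s : List Char) : Bool := adjLoop (s.zip (PySem.List.slice s (some 1) none))

def f_alt (password : String) : Bool :=
  if PySem.Str.len password < 6 then false
  else bScan (PySem.List.sorted password.toList (fun x => x) false)

-- ===== PRECONDITION & SPEC =====
def Spec_f (password : String) (out : Bool) : Prop := out = f_alt password
instance (password : String) (out : Bool) : Decidable (Spec_f password out) := by unfold Spec_f; infer_instance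

-- ===== CLAIM (what is proved, stated in full; the proofs are below) =====
def Claim_equal_f : Prop := ∀ (password : String), Dom_f password → Spec_f password (f password)

-- ===== LEMMAS AND PROOFS =====

-- A's append loop is a map
lemma foldl_append_ite (l : List Char) (p : Char → Prop) [DecidablePred p] (a b : Int)
    (init : List Int) :
    l.foldl (fun acc x => if p x then acc ++ [a] else acc ++ [b]) init
      = init ++ l.map (fun x => if p x then a else b) := by
  induction l generalizing init with
  | nil => simp
  | cons y t ih => simp only [List.foldl_cons, List.map_cons]; split_ifs <;> simp [ih]

-- A's flag list contains 0 iff the list has a repeated element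
lemma a_flag (l : List Char) :
    ((0 : Int) ∈ l.map (fun x => if 1 < PySem.List.count l x then (0:Int) else 1)) ↔ ¬ l.Nodup := by
  rw [List.nodup_iff_count_le_one]
  simp only [List.mem_map]
  constructor
  · rintro ⟨x, hx, hv⟩
    split_ifs at hv with h
    · intro hall
      have := hall x
      rw [PySem.List.count_eq] at h
      omega
    · exact absurd hv (by norm_num)
  · intro h
    push Not at h
    obtain ⟨x, hx⟩ := h
    have hmem : x ∈ l := by
      by_contra hnm
      rw [List.count_eq_zero_of_not_mem hnm] at hx; omega
    exact ⟨x, hmem, by rw [if_pos (by rw [PySem.List.count_eq]; omega)]⟩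

-- on a ≤-sorted list, the adjacent-pair scan decides Nodup
lemma adjLoop_sorted (s : List Char) (h : s.Pairwise (· ≤ ·)) :
    adjLoop (s.zip (s.drop 1)) = true ↔ s.Nodup := by
  induction s with
  | nil => simp [adjLoop]
  | cons a t ih =>
    cases t with
    | nil => simp [adjLoop]
    | cons b t' =>
      simp only [List.drop_one, List.tail_cons, List.zip_cons_cons, adjLoop]
      have hp := (List.pairwise_cons.mp h)
      have hab : a ≤ b := hp.1 b (by simp)
      have hrest := hp.2
      split_ifs with hb
      · have : a = b := by simpa using hb
        subst this
        simp
      · have hne : a ≠ b := by simpa using hb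
        have hlt : a < b := lt_of_le_of_ne hab hne
        have hnm : a ∉ b :: t' := by
          intro hmem
          rcases List.mem_cons.mp hmem with rfl | hmem'
          · exact hne rfl
          · have hbc : b ≤ a := (List.pairwise_cons.mp hrest).1 a hmem'
            exact absurd (lt_of_lt_of_le hlt hbc) (lt_irrefl a)
        have := ih hrest
        simp only [List.drop_one, List.tail_cons] at this
        simpa [List.nodup_cons, hnm] using this

-- bScan on a sorted list decides Nodup
lemma bScan_sorted (s : List Char) (h : s.Pairwise (· ≤ ·)) : bScan s = true ↔ s.Nodup := by
  unfold bScan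
  have h1 : PySem.List.slice s (some ((1:Nat) : Int)) none = s.drop 1 :=
    PySem.List.slice_from_natCast s 1
  rw [show ((1:Nat):Int) = (1:Int) from rfl] at h1
  rw [h1]
  exact adjLoop_sorted s h

theorem f_spec : Claim_equal_f := by
  intro password _
  unfold Spec_f f f_alt
  by_cases hlen : PySem.Str.len password < 6
  · rw [if_neg (show ¬ 6 ≤ PySem.Str.len password by omega), if_pos hlen]
  · rw [if_pos (show 6 ≤ PySem.Str.len password by omega), if_neg hlen]
    have hperm : (PySem.List.sorted password.toList (fun x => x) false).Perm password.toList :=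
      PySem.List.sorted_perm password.toList (fun x => x) false
    have hBs := bScan_sorted _ (PySem.List.sorted_pairwise password.toList (fun x => x))
    have hA : aLoop password.toList
        = password.toList.map (fun x => if 1 < PySem.List.count password.toList x then (0:Int) else 1) := by
      unfold aLoop
      simpa using foldl_append_ite password.toList
        (fun x => 1 < PySem.List.count password.toList x) 0 1 []
    rw [hA]
    by_cases hd : password.toList.Nodup
    · rw [if_neg (by rw [a_flag]; exact fun h => h hd),
        (hBs.mpr (hperm.nodup_iff.mpr hd)).symm]
    · rw [if_pos (by rw [a_flag]; exact hd)]
      exact (Bool.eq_false_iff.mpr (fun h => hd (hperm.nodup_iff.mp (hBs.mp h)))).symm
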